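-- pv_equiv track=rewrite | github.com/ale-tom/hydro_control_rl_optimiser | src/hydro_control_rl_optimiser/plots_and_reports.py | dwell_times
-- ===== SOURCE A (Python) =====
-- from typing import Any, Dict, List, Optional, Sequence, Tuple, Iterable
--
-- def dwell_times(actions: List[Tuple[int, ...]]) -> Dict[int, List[int]]:
--     """Return dwell times (minutes spent before changing) aggregated across all stations. Dict[station_idx] -> list of durations."""
--     if not actions:
--         return {}
--     n_stations = len(actions[0])
--     per_station: Dict[int, List[int]] = {i: [] for i in range(n_stations)}
--     for i in range(n_stations):
--         prev = actions[0][i]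
--         run = 1
--         for a in actions[1:]:
--             if a[i] == prev:
--                 run += 1
--             else:
--                 per_station[i].append(run)
--                 prev = a[i]
--                 run = 1
--         per_station[i].append(run)
--     return per_station
-- ===== SOURCE B (Python) =====
-- from typing import Dict, List, Tuple
--
--
-- def dwell_times(actions: List[Tuple[int, ...]]) -> Dict[int, List[int]]:
--     """Single forward pass over timesteps, updating every station's run in parallel."""
--     if not actions:
--         return {}
--     n_stations = len(actions[0])
--     prev = list(actions[0])
--     run = [1] * n_stations
--     per_station: Dict[int, List[int]] = {i: [] for i in range(n_stations)}
--     for a in actions[1:]: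
--         for i in range(n_stations):
--             if a[i] == prev[i]:
--                 run[i] += 1
--             else:
--                 per_station[i].append(run[i])
--                 prev[i] = a[i]
--                 run[i] = 1
--     for i in range(n_stations):
--         per_station[i].append(run[i])
--     return per_station
-- ===== Notes on version B (the rewrite author's own statement) =====
-- stated objective: alternative
-- what changed: Replaces A's S separate rescans of the whole action list (one per station) by a single forward pass over timesteps that maintains prev/run/duration state for all stations in parallel.
import Mathlib
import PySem

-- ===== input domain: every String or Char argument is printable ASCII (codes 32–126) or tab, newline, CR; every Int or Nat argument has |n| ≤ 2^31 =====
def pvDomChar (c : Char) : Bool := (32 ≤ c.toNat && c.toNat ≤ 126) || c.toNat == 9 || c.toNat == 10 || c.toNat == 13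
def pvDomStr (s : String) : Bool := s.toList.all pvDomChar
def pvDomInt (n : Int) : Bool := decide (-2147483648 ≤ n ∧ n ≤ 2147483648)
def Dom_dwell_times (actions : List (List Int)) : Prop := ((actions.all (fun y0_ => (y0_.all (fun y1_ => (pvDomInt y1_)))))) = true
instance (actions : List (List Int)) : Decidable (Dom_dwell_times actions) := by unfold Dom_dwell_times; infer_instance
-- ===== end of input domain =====

-- B replaces A's per-station rescans of the action list by one forward pass over
-- timesteps maintaining all stations' run state in parallel (alternative decomposition, same cost).


-- ===== PORT A =====
-- per-station: for each i in range(n), scan actions[1:] tracking (prev, run, durations)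
def dwell_times (actions : List (List Int)) : List (Int × List Int) :=
  match actions with
  | [] => []
  | a0 :: rest =>
    let n := a0.length
    (List.range n).map (fun (i : Nat) =>
      let prev0 := (PySem.List.pyGet? a0 (i : Int)).getD 0  -- IndexError impossible: i < len(a0)
      let st := rest.foldl
        (fun (s : Int × Int × List Int) a =>
          let ai := (PySem.List.pyGet? a (i : Int)).getD 0  -- none = IndexError, excluded by Pre_
          if ai == s.1 then (s.1, s.2.1 + 1, s.2.2)
          else (ai, 1, s.2.2 ++ [s.2.1]))
        (prev0, 1, ([] : List Int))
      ((i : Int), st.2.2 ++ [st.2.1]))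

-- ===== PORT B =====
-- one pass over rest; the parallel lists prev/run/per_station are one list of triples,
-- and the inner 'for i in range(n_stations)' rebuilds that list positionally
def dwell_times_alt (actions : List (List Int)) : List (Int × List Int) :=
  match actions with
  | [] => []
  | a0 :: rest =>
    let init := a0.map (fun p => (p, (1 : Int), ([] : List Int)))
    let fin := rest.foldl
      (fun st a =>
        (PySem.List.enumerate st).map (fun p =>
          let ai := (PySem.List.pyGet? a p.1).getD 0  -- none = IndexError, excluded by Pre_
          if ai == p.2.1 then (p.2.1, p.2.2.1 + 1, p.2.2.2)
          else (ai, 1, p.2.2.2 ++ [p.2.2.1])))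
      init
    (PySem.List.enumerate fin).map (fun p => (p.1, p.2.2.2 ++ [p.2.2.1]))

-- ===== PRECONDITION & SPEC =====
-- Pre_ excludes ragged inputs where some later row is shorter than the first row:
-- there both Pythons raise IndexError at a[i].
def Pre_dwell_times (actions : List (List Int)) : Prop :=
  ∀ a ∈ actions.tail, (actions.headD []).length ≤ a.length
instance (actions : List (List Int)) : Decidable (Pre_dwell_times actions) := by
  unfold Pre_dwell_times; infer_instance
def pvWitness_dwell_times : List (List Int) := [[1, 2], [1, 3], [0, 3]]
def Spec_dwell_times (actions : List (List Int)) (out : List (Int × List Int)) : Prop := out = dwell_times_alt actions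
instance (actions : List (List Int)) (out : List (Int × List Int)) : Decidable (Spec_dwell_times actions out) := by unfold Spec_dwell_times; infer_instance

-- ===== CLAIM (what is proved, stated in full; the proofs are below) =====
def Claim_equal_dwell_times : Prop := ∀ (actions : List (List Int)), Dom_dwell_times actions → Pre_dwell_times actions → Spec_dwell_times actions (dwell_times actions)

-- ===== LEMMAS AND PROOFS =====

-- the common column step at index i
def pvStep (i : Int) (s : Int × Int × List Int) (a : List Int) : Int × Int × List Int :=
  if ((PySem.List.pyGet? a i).getD 0 == s.1) = true then (s.1, s.2.1 + 1, s.2.2)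
  else ((PySem.List.pyGet? a i).getD 0, 1, s.2.2 ++ [s.2.1])

lemma pvStep_def (i : Int) : pvStep i = fun s a =>
    if ((PySem.List.pyGet? a i).getD 0 == s.1) = true then (s.1, s.2.1 + 1, s.2.2)
    else ((PySem.List.pyGet? a i).getD 0, 1, s.2.2 ++ [s.2.1]) := rfl

-- B's whole-state step, element by element
lemma pvStepB_getElem? (a : List Int) (st : List (Int × Int × List Int)) (k : Nat) :
    ((PySem.List.enumerate st).map (fun p =>
      if ((PySem.List.pyGet? a p.1).getD 0 == p.2.1) = true then (p.2.1, p.2.2.1 + 1, p.2.2.2)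
      else ((PySem.List.pyGet? a p.1).getD 0, 1, p.2.2.2 ++ [p.2.2.1])))[k]? =
    (st[k]?).map (fun s => pvStep (k : Int) s a) := by
  simp only [List.getElem?_map, PySem.List.getElem?_enumerate, Option.map_map]
  cases st[k]? <;> simp [pvStep]

-- the folded whole-state pass, element by element: column k folds independently
lemma pvFold_getElem? (rest : List (List Int)) (st : List (Int × Int × List Int)) (k : Nat) :
    (rest.foldl
      (fun st a =>
        (PySem.List.enumerate st).map (fun p =>
          if ((PySem.List.pyGet? a p.1).getD 0 == p.2.1) = true then (p.2.1, p.2.2.1 + 1, p.2.2.2)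
          else ((PySem.List.pyGet? a p.1).getD 0, 1, p.2.2.2 ++ [p.2.2.1])))
      st)[k]? =
    (st[k]?).map (fun s => rest.foldl (pvStep (k : Int)) s) := by
  induction rest generalizing st with
  | nil => cases h : st[k]? <;> simp [h]
  | cons a rest ih =>
    simp only [List.foldl_cons]
    rw [ih, pvStepB_getElem?]
    cases st[k]? <;> simp

theorem dwell_times_spec : Claim_equal_dwell_times := by
  intro actions _hdom hpre
  unfold Spec_dwell_times
  cases actions with
  | nil => rfl
  | cons a0 rest =>
    simp only [dwell_times, dwell_times_alt]
    apply List.ext_getElem?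
    intro k
    rw [List.getElem?_map, List.getElem?_map, PySem.List.getElem?_enumerate,
      pvFold_getElem?, List.getElem?_map]
    by_cases hk : k < a0.length
    · rw [List.getElem?_range hk, List.getElem?_eq_getElem hk]
      simp only [Option.map_some, zero_add]
      rw [PySem.List.pyGet?_ofNat _ _ hk]
      simp [pvStep_def]
    · have hk' : a0.length ≤ k := Nat.le_of_not_lt hk
      rw [List.getElem?_eq_none (by simpa using hk'),
        List.getElem?_eq_none (by simpa using hk')]
      rfl
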